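-- pv_equiv track=rewrite | github.com/pypi-data/pypi-mirror-168 | packages/randomlib/randomlib-0.12-py3-none-any.whl/randomlib/tokenizer/tokenize.py | wordTokenize_mr
-- ===== SOURCE A (Python) =====
-- def wordTokenize_mr(txt, punctuation):
--     punc = '''!()-[]{};:'"\,<>./?@#$%^&*_~'''
--     if punctuation:
--         str = ""
--         tokens = []
--         for ele in txt:
--             if ele in punc:
--                 if str:
--                     tokens.append(str)
--                     str = ""
--                 tokens.append(ele)
--             elif ele == " ":
--                 if str:
--                     tokens.append(str)
--                     str = ""
--             else:
--                 str += ele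
--         if str:
--             tokens.append(str)
--             str = ""
--         return tokens
--     else:
--         for ele in txt:
--             if ele in punc:
--                 txt = txt.replace(ele, " ")
--         x = txt.split()
--         return x
-- ===== SOURCE B (Python) =====
-- def wordTokenize_mr(txt, punctuation):
--     punc = set('''!()-[]{};:'"\,<>./?@#$%^&*_~''')
--     if punctuation:
--         tokens = []
--         i, n = 0, len(txt)
--         while i < n:
--             c = txt[i]
--             if c in punc:
--                 tokens.append(c)
--                 i += 1
--             elif c == " ":
--                 i += 1
--             else:
--                 j = i + 1
--                 while j < n and txt[j] != " " and txt[j] not in punc: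
--                     j += 1
--                 tokens.append(txt[i:j])
--                 i = j
--         return tokens
--     else:
--         cleaned = "".join(" " if c in punc else c for c in txt)
--         return cleaned.split()
-- ===== Notes on version B (the rewrite author's own statement) =====
-- stated objective: alternative
-- what changed: The punctuation branch's accumulator state machine is replaced by index scanning that emits each maximal non-separator run via an inner takeWhile-style loop and slicing, and the no-punctuation branch's repeated whole-string replace() loop is replaced by a single per-character map (join of a generator) before split().
import Mathlib
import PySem

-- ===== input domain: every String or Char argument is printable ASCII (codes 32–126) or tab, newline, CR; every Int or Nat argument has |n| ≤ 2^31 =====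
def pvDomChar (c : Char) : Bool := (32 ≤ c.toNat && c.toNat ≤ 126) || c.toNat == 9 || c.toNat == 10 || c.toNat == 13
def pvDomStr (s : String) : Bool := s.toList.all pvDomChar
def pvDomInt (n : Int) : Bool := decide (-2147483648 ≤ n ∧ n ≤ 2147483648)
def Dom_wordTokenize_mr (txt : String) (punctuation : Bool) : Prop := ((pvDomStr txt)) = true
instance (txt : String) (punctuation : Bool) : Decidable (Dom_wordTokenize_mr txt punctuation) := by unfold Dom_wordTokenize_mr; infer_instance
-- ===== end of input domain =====

-- B rewrites the tokenizer: index/maximal-run scanning instead of a char accumulator for the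
-- punctuation branch, and a single per-character map instead of repeated replace() otherwise.


-- the punctuation string '''!()-[]{};:'"\,<>./?@#$%^&*_~''' (the backslash is literal)
def pvPunc : List Char := "!()-[]{};:'\"\\,<>./?@#$%^&*_~".toList

-- ===== PORT A =====
def wordTokenize_mr (txt : String) (punctuation : Bool) : List String :=
  if punctuation then
    -- state (str, tokens); 'if str:' is non-emptiness
    let r := txt.toList.foldl (fun (st : List Char × List (List Char)) ele =>
      if pvPunc.contains ele then
        ([], (if st.1.isEmpty then st.2 else st.2 ++ [st.1]) ++ [[ele]])
      else if ele = ' ' then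
        ([], if st.1.isEmpty then st.2 else st.2 ++ [st.1])
      else (st.1 ++ [ele], st.2)) ([], [])
    (if r.1.isEmpty then r.2 else r.2 ++ [r.1]).map String.mk
  else
    -- 'for ele in txt' iterates the ORIGINAL string while txt is rebound
    let t := txt.toList.foldl (fun t ele =>
      if pvPunc.contains ele then PySem.Chars.replace t [ele] [' '] else t) txt.toList
    (PySem.Chars.split₀ t).map String.mk

-- ===== PORT B =====
def pvWord (c : Char) : Bool := !(pvPunc.contains c) && !(c == ' ')

-- the while-loop over index i; the inner j-loop collecting txt[i:j] is takeWhile/dropWhile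
def scanB : List Char → List (List Char)
  | [] => []
  | c :: rest =>
    if pvPunc.contains c then [c] :: scanB rest
    else if c = ' ' then scanB rest
    else (c :: rest.takeWhile pvWord) :: scanB (rest.dropWhile pvWord)
termination_by cs => cs.length
decreasing_by
  · simp
  · simp
  · have := List.length_dropWhile_le pvWord rest; simp; omega

def wordTokenize_mr_alt (txt : String) (punctuation : Bool) : List String :=
  if punctuation then
    (scanB txt.toList).map String.mk
  else
    (PySem.Chars.split₀ (txt.toList.map (fun c => if pvPunc.contains c then ' ' else c))).map String.mk

-- ===== PRECONDITION & SPEC =====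
def Spec_wordTokenize_mr (txt : String) (punctuation : Bool) (out : List String) : Prop := out = wordTokenize_mr_alt txt punctuation
instance (txt : String) (punctuation : Bool) (out : List String) : Decidable (Spec_wordTokenize_mr txt punctuation out) := by unfold Spec_wordTokenize_mr; infer_instance

-- ===== CLAIM (what is proved, stated in full; the proofs are below) =====
def Claim_equal_wordTokenize_mr : Prop := ∀ (txt : String) (punctuation : Bool), Dom_wordTokenize_mr txt punctuation → Spec_wordTokenize_mr txt punctuation (wordTokenize_mr txt punctuation)

-- ===== LEMMAS AND PROOFS =====

theorem space_not_punc : (' ' ∈ pvPunc) = False := by decide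

def pvRepl (c : Char) : Char := if pvPunc.contains c then ' ' else c

-- replacing one single char by one single char is a pointwise map
theorem replace_go_single (a b : Char) :
    ∀ (fuel : Nat) (l acc : List Char), l.length ≤ fuel →
      PySem.Chars.replace.go [a] [b] fuel l acc
        = acc.reverse ++ l.map (fun c => if c = a then b else c) := by
  intro fuel
  induction fuel with
  | zero =>
    intro l acc h
    have : l = [] := List.length_eq_zero_iff.mp (Nat.le_zero.mp h)
    subst this; simp [PySem.Chars.replace.go]
  | succ n ih =>
    intro l acc h
    cases l with
    | nil => simp [PySem.Chars.replace.go]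
    | cons c t =>
      simp only [PySem.Chars.replace.go]
      by_cases hc : c = a
      · subst hc
        have hp : List.isPrefixOf [c] (c :: t) = true := by
          simp [List.isPrefixOf]
        simp only [hp, if_pos]
        rw [ih _ _ (by simpa using Nat.le_of_succ_le_succ h)]
        simp
      · have hp : List.isPrefixOf [a] (c :: t) = false := by
          simp [List.isPrefixOf]; exact fun h' => absurd h'.symm hc
        simp only [hp]
        rw [if_neg (by simp), ih _ _ (by simpa using Nat.le_of_succ_le_succ h)]
        simp [hc]

theorem replace_single (a b : Char) (s : List Char) :
    PySem.Chars.replace s [a] [b] = s.map (fun c => if c = a then b else c) := by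
  simp [PySem.Chars.replace]
  rw [replace_go_single a b s.length s [] (le_refl _)]
  simp

-- the replace-loop of A equals one map, as long as every punc char of the state occurs in the driver list
theorem foldl_replace_eq_map :
    ∀ (cs s : List Char), (∀ c ∈ s, pvPunc.contains c = true → c ∈ cs) →
      cs.foldl (fun t ele => if pvPunc.contains ele then PySem.Chars.replace t [ele] [' '] else t) s
        = s.map pvRepl := by
  intro cs
  induction cs with
  | nil =>
    intro s h
    have : ∀ c ∈ s, pvRepl c = c := by
      intro c hc
      have hm : c ∉ pvPunc := by
        intro hmem
        exact absurd (h c hc (by simpa using hmem)) (by simp)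
      simp [pvRepl, hm]
    simp [List.map_congr_left this]
  | cons e cs ih =>
    intro s h
    simp only [List.foldl_cons]
    by_cases he : pvPunc.contains e = true
    · rw [if_pos he, replace_single]
      rw [ih]
      · rw [List.map_map]
        apply List.map_congr_left
        intro c _
        by_cases hce : c = e
        · subst hce
          have hem : c ∈ pvPunc := by simpa using he
          simp only [Function.comp, if_pos rfl]
          simp [pvRepl, hem, space_not_punc]
        · simp [pvRepl, hce]
      · intro c hc hp
        rcases List.mem_map.mp hc with ⟨d, hd, hdc⟩
        by_cases hde : d = e
        · subst hde
          simp only [if_pos rfl] at hdc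
          rw [← hdc] at hp
          simp [pvPunc] at hp
        · simp only [if_neg hde] at hdc
          subst hdc
          have := h d hd hp
          simp at this
          rcases this with h1 | h2
          · exact absurd h1 hde
          · exact h2
    · rw [if_neg he]
      apply ih
      intro c hc hp
      have := h c hc hp
      simp at this
      rcases this with h1 | h2
      · subst h1; exact absurd hp he
      · exact h2

-- A's punctuation-branch loop body, named for the proofs (defeq to the lambda in the port)
def stepA (st : List Char × List (List Char)) (ele : Char) : List Char × List (List Char) :=
  if pvPunc.contains ele then
    ([], (if st.1.isEmpty then st.2 else st.2 ++ [st.1]) ++ [[ele]])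
  else if ele = ' ' then
    ([], if st.1.isEmpty then st.2 else st.2 ++ [st.1])
  else (st.1 ++ [ele], st.2)

-- pure rendering of A's punctuation-branch fold
def auxA : List Char → List Char → List (List Char)
  | [], str => if str.isEmpty then [] else [str]
  | c :: cs, str =>
    if pvPunc.contains c then (if str.isEmpty then [] else [str]) ++ [c] :: auxA cs []
    else if c = ' ' then (if str.isEmpty then [] else [str]) ++ auxA cs []
    else auxA cs (str ++ [c])

theorem foldA_eq_auxA :
    ∀ (cs str : List Char) (toks : List (List Char)),
      (if (cs.foldl stepA (str, toks)).1.isEmpty then (cs.foldl stepA (str, toks)).2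
       else (cs.foldl stepA (str, toks)).2 ++ [(cs.foldl stepA (str, toks)).1])
        = toks ++ auxA cs str := by
  intro cs
  induction cs with
  | nil => intro str toks; by_cases h : str.isEmpty <;> simp [auxA, h]
  | cons c cs ih =>
    intro str toks
    simp only [List.foldl_cons]
    by_cases hc : pvPunc.contains c
    · have hcm : c ∈ pvPunc := by simpa using hc
      rw [show stepA (str, toks) c
          = ([], (if str.isEmpty then toks else toks ++ [str]) ++ [[c]]) from by
            simp [stepA, hcm]]
      rw [ih, auxA]
      by_cases hs : str.isEmpty <;> simp [hs, hcm]
    · have hcm : c ∉ pvPunc := by simpa using hc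
      by_cases hsp : c = ' '
      · rw [show stepA (str, toks) c
            = ([], if str.isEmpty then toks else toks ++ [str]) from by
              simp [stepA, hcm, hsp, space_not_punc]]
        rw [ih, auxA]
        by_cases hs : str.isEmpty <;> simp [hs, hcm, hsp, space_not_punc]
      · rw [show stepA (str, toks) c = (str ++ [c], toks) from by simp [stepA, hcm, hsp]]
        rw [ih, auxA]
        simp [hcm, hsp]

theorem auxA_eq_scanB :
    ∀ (n : Nat) (cs : List Char), cs.length ≤ n →
      auxA cs [] = scanB cs ∧
      ∀ str : List Char, str.isEmpty = false →
        auxA cs str = (str ++ cs.takeWhile pvWord) :: scanB (cs.dropWhile pvWord) := by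
  intro n
  induction n with
  | zero =>
    intro cs h
    have : cs = [] := List.length_eq_zero_iff.mp (Nat.le_zero.mp h)
    subst this
    exact ⟨by simp [auxA, scanB], fun str hs => by simp [auxA, scanB, hs]⟩
  | succ n ih =>
    intro cs h
    cases cs with
    | nil => exact ⟨by simp [auxA, scanB], fun str hs => by simp [auxA, scanB, hs]⟩
    | cons c cs =>
      have hlen : cs.length ≤ n := by simpa using Nat.le_of_succ_le_succ h
      constructor
      · show auxA (c :: cs) [] = scanB (c :: cs)
        rw [auxA, scanB]
        by_cases hc : pvPunc.contains c
        · have hcm : c ∈ pvPunc := by simpa using hc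
          simp [hcm, (ih cs hlen).1]
        · have hcm : c ∉ pvPunc := by simpa using hc
          by_cases hsp : c = ' '
          · simp [hcm, hsp, (ih cs hlen).1]
          · rw [if_neg hc, if_neg hc, if_neg hsp, if_neg hsp, List.nil_append]
            rw [(ih cs hlen).2 [c] (by simp)]
            simp
      · intro str hs
        rw [auxA]
        by_cases hc : pvPunc.contains c
        · have hcm : c ∈ pvPunc := by simpa using hc
          have hw : pvWord c = false := by simp [pvWord, hcm]
          rw [List.takeWhile_cons_of_neg (by simp [hw]), List.dropWhile_cons_of_neg (by simp [hw])]
          rw [if_pos hc, (ih cs hlen).1, scanB, if_pos hc]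
          simp [hs]
        · have hcm : c ∉ pvPunc := by simpa using hc
          by_cases hsp : c = ' '
          · have hw : pvWord c = false := by simp [pvWord, hsp]
            rw [List.takeWhile_cons_of_neg (by simp [hw]), List.dropWhile_cons_of_neg (by simp [hw])]
            rw [if_neg hc, if_pos hsp, (ih cs hlen).1, scanB, if_neg hc, if_pos hsp]
            simp [hs]
          · have hw : pvWord c = true := by simp [pvWord, hcm, hsp]
            rw [List.takeWhile_cons_of_pos (by simp [hw]), List.dropWhile_cons_of_pos (by simp [hw])]
            rw [if_neg hc, if_neg hsp, (ih cs hlen).2 (str ++ [c]) (by simp)]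
            simp

theorem foldA_scanB (l : List Char) :
    (if (l.foldl stepA ([], [])).1.isEmpty then (l.foldl stepA ([], [])).2
     else (l.foldl stepA ([], [])).2 ++ [(l.foldl stepA ([], [])).1]) = scanB l := by
  rw [foldA_eq_auxA l [] []]
  simp [(auxA_eq_scanB l.length l (le_refl _)).1]

-- ===== VERDICT (by name: the statement is the Claim_ definition above) =====
theorem wordTokenize_mr_spec : Claim_equal_wordTokenize_mr := by
  intro txt punctuation _
  unfold Spec_wordTokenize_mr wordTokenize_mr wordTokenize_mr_alt
  cases punctuation with
  | true =>
    rw [if_pos rfl, if_pos rfl]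
    exact congrArg (fun l => l.map String.mk) (foldA_scanB txt.toList)
  | false =>
    simp only [Bool.false_eq_true, ite_false]
    rw [foldl_replace_eq_map txt.toList txt.toList (fun c hc _ => hc)]
    rfl
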